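-- pv_equiv track=rewrite | github.com/AfricTivistes/depo-ai | app.py | _detect_audit_type
-- ===== SOURCE A (Python) =====
-- def _detect_audit_type(responses):
--     """
--     Détecte automatiquement le type d'audit à partir des questions
--
--     Args:
--         responses (dict): Dictionnaire de questions/réponses
--
--     Returns:
--         str: Type d'audit détecté
--     """
--     # Mots-clés pour différents domaines de la cybersécurité
--     domains = {
--         "Politique de mots de passe": ["mot de passe", "password", "authentification", "connexion"],
--         "Sécurité des réseaux": ["réseau", "network", "firewall", "pare-feu", "vpn", "wifi", "routeur"],
--         "Gestion des accès": ["accès", "access", "droits", "permission", "privilege", "utilisateur", "user"],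
--         "Protection des données": ["donnée", "data", "chiffrement", "encryption", "backup", "sauvegarde"],
--         "Sécurité physique": ["physique", "physical", "bâtiment", "building", "local", "vol", "theft"],
--         "Formation et sensibilisation": ["formation", "training", "sensibilisation", "awareness", "employé"],
--         "Gestion des incidents": ["incident", "crise", "réponse", "response", "attaque", "breach"],
--         "Conformité réglementaire": ["rgpd", "gdpr", "conformité", "compliance", "régulation", "legal"]
--     }
--
--     # Compter les occurrences des mots-clés
--     domain_counts = {domain: 0 for domain in domains}
--
--     for question in responses.keys():
--         question_lower = question.lower()
--         for domain, keywords in domains.items():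
--             for keyword in keywords:
--                 if keyword.lower() in question_lower:
--                     domain_counts[domain] += 1
--
--     # Déterminer le domaine principal
--     main_domains = sorted(domain_counts.items(), key=lambda x: x[1], reverse=True)
--
--     # Si plusieurs domaines sont couverts de manière équivalente, c'est un audit complet
--     if len(main_domains) > 3 and main_domains[0][1] > 0 and main_domains[1][1] > 0 and main_domains[2][1] > 0:
--         return "Audit de sécurité complet"
--     elif main_domains[0][1] > 0:
--         return f"Audit spécifique: {main_domains[0][0]}"
--     else:
--         return "Audit de sécurité général"
-- ===== SOURCE B (Python) =====
-- def _detect_audit_type(responses):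
--     """Single-pass reclassification: count keyword hits per domain, then pick
--     the number of covered domains and the first best domain in one scan
--     (no sort)."""
--     domains = [
--         ("Politique de mots de passe", ["mot de passe", "password", "authentification", "connexion"]),
--         ("Sécurité des réseaux", ["réseau", "network", "firewall", "pare-feu", "vpn", "wifi", "routeur"]),
--         ("Gestion des accès", ["accès", "access", "droits", "permission", "privilege", "utilisateur", "user"]),
--         ("Protection des données", ["donnée", "data", "chiffrement", "encryption", "backup", "sauvegarde"]),
--         ("Sécurité physique", ["physique", "physical", "bâtiment", "building", "local", "vol", "theft"]),
--         ("Formation et sensibilisation", ["formation", "training", "sensibilisation", "awareness", "employé"]),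
--         ("Gestion des incidents", ["incident", "crise", "réponse", "response", "attaque", "breach"]),
--         ("Conformité réglementaire", ["rgpd", "gdpr", "conformité", "compliance", "régulation", "legal"]),
--     ]
--     lowered = [q.lower() for q in responses]
--     counts = [(name, sum(1 for ql in lowered for kw in kws if kw.lower() in ql))
--               for name, kws in domains]
--     nonzero = 0
--     best_name, best_count = "", 0
--     for name, c in counts:
--         if c > 0:
--             nonzero += 1
--         if c > best_count:
--             best_name, best_count = name, c
--     if nonzero >= 3:
--         return "Audit de sécurité complet"
--     if best_count > 0:
--         return f"Audit spécifique: {best_name}"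
--     return "Audit de sécurité général"
-- ===== Notes on version B (the rewrite author's own statement) =====
-- stated objective: simpler
-- what changed: B drops A's per-keyword dict mutation and the full descending sort: it builds the per-domain counts as plain sums and replaces sorted+indexing by one scan that tracks the number of covered domains and the first best domain (max with first-wins tie-break, matching the stable sort's head; top-3-all-positive equals at-least-3-covered since there are always 8 domains).
import Mathlib
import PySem

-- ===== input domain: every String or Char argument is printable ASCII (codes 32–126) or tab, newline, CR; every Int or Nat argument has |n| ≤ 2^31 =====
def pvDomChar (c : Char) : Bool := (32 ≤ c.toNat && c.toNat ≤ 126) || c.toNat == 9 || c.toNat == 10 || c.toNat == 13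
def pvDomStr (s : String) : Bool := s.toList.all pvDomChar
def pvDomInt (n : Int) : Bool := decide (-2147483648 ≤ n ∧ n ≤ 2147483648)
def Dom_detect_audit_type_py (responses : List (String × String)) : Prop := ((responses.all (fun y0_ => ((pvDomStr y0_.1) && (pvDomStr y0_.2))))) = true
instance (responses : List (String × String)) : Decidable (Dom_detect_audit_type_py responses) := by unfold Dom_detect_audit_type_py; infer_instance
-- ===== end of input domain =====

-- B replaces A's sort-then-index classification by a single scan (count of covered
-- domains + first best domain); objective: simpler (drop the sort). Equivalence is
-- about the RETURN value (neither version mutates its argument).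

-- ===== PORT A =====
-- the literal keyword table shared by both Python versions
def auditDomains : List (String × List String) :=
  [("Politique de mots de passe", ["mot de passe", "password", "authentification", "connexion"]),
   ("Sécurité des réseaux", ["réseau", "network", "firewall", "pare-feu", "vpn", "wifi", "routeur"]),
   ("Gestion des accès", ["accès", "access", "droits", "permission", "privilege", "utilisateur", "user"]),
   ("Protection des données", ["donnée", "data", "chiffrement", "encryption", "backup", "sauvegarde"]),
   ("Sécurité physique", ["physique", "physical", "bâtiment", "building", "local", "vol", "theft"]),
   ("Formation et sensibilisation", ["formation", "training", "sensibilisation", "awareness", "employé"]),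
   ("Gestion des incidents", ["incident", "crise", "réponse", "response", "attaque", "breach"]),
   ("Conformité réglementaire", ["rgpd", "gdpr", "conformité", "compliance", "régulation", "legal"])]

def detect_audit_type_py (responses : List (String × String)) : String :=
  let dc0 : PySem.Dict String Int :=
    auditDomains.foldl (fun d p => d.insert p.1 0) PySem.Dict.empty
  let qs := (PySem.Dict.ofList responses).keys
  let dc := qs.foldl (fun dcq question =>
      let question_lower := PySem.Str.lower question
      auditDomains.foldl (fun dc2 dk =>
        dk.2.foldl (fun dc3 keyword =>
          if PySem.Str.isIn (PySem.Str.lower keyword) question_lower then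
            dc3.modify dk.1 0 (· + 1)
          else dc3) dc2) dcq) dc0
  let md := PySem.List.sorted dc.items (fun x => x.2) true
  if 3 < PySem.List.len md ∧ 0 < (PySem.List.pyGetD md 0 ("", 0)).2 ∧
      0 < (PySem.List.pyGetD md 1 ("", 0)).2 ∧ 0 < (PySem.List.pyGetD md 2 ("", 0)).2 then
    "Audit de sécurité complet"
  else if 0 < (PySem.List.pyGetD md 0 ("", 0)).2 then
    "Audit spécifique: " ++ (PySem.List.pyGetD md 0 ("", 0)).1
  else
    "Audit de sécurité général"

-- ===== PORT B =====
def detect_audit_type_py_alt (responses : List (String × String)) : String :=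
  let lowered := ((PySem.Dict.ofList responses).keys).map PySem.Str.lower
  let counts := auditDomains.map (fun dk =>
      (dk.1, ((lowered.map (fun ql =>
        ((dk.2.countP (fun kw => PySem.Str.isIn (PySem.Str.lower kw) ql) : Nat) : Int))).sum)))
  let st := counts.foldl (fun st p =>
      let st1 := if 0 < p.2 then (st.1 + 1, st.2) else st
      if st1.2.2 < p.2 then (st1.1, p.1, p.2) else st1) ((0 : Int), ("", (0 : Int)))
  if 3 ≤ st.1 then "Audit de sécurité complet"
  else if 0 < st.2.2 then "Audit spécifique: " ++ st.2.1
  else "Audit de sécurité général"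

-- ===== PRECONDITION & SPEC =====
def Spec_detect_audit_type_py (responses : List (String × String)) (out : String) : Prop := out = detect_audit_type_py_alt responses
instance (responses : List (String × String)) (out : String) : Decidable (Spec_detect_audit_type_py responses out) := by unfold Spec_detect_audit_type_py; infer_instance

-- ===== CLAIM (what is proved, stated in full; the proofs are below) =====
def Claim_equal_detect_audit_type_py : Prop := ∀ (responses : List (String × String)), Dom_detect_audit_type_py responses → Spec_detect_audit_type_py responses (detect_audit_type_py responses)

-- ===== LEMMAS AND PROOFS =====

-- per-question keyword count of one domain (A computes it by dict increments,
-- B as a sum of countP's)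
def cQ (kws : List String) (q : String) : Int :=
  ((kws.countP (fun kw => PySem.Str.isIn (PySem.Str.lower kw) (PySem.Str.lower q)) : Nat) : Int)

def cnt (kws : List String) (qs : List String) : Int :=
  ((qs.map PySem.Str.lower).map (fun ql =>
    ((kws.countP (fun kw => PySem.Str.isIn (PySem.Str.lower kw) ql) : Nat) : Int))).sum

def bstep (b p : String × Int) : String × Int := if b.2 < p.2 then p else b

lemma cnt_nil (kws : List String) : cnt kws [] = 0 := by simp [cnt]

lemma cnt_cons (kws : List String) (q : String) (qs : List String) :
    cnt kws (q :: qs) = cQ kws q + cnt kws qs := by simp [cnt, cQ]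

lemma cnt_nonneg (kws : List String) (qs : List String) : 0 ≤ cnt kws qs := by
  apply List.sum_nonneg
  intro x hx
  simp only [List.mem_map] at hx
  obtain ⟨ql, -, rfl⟩ := hx
  positivity

lemma map_keep (k : String) (w : String × Int) (L : List (String × Int))
    (hL : ∀ s ∈ L.map Prod.fst, (s == k) = false) :
    L.map (fun p => if (p.1 == k) = true then w else p) = L := by
  induction L with
  | nil => rfl
  | cons a t ih =>
      have ha : (a.1 == k) = false := hL a.1 (by simp)
      rw [List.map_cons, ih (fun s hs => hL s (by simp [hs])), if_neg (by simp [ha])]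

lemma modify_mid (pre post : List (String × Int)) (k : String) (v : Int) (f : Int → Int)
    (hpre : ∀ s ∈ pre.map Prod.fst, (s == k) = false)
    (hpost : ∀ s ∈ post.map Prod.fst, (s == k) = false) :
    (PySem.Dict.mk (pre ++ (k, v) :: post)).modify k 0 f = PySem.Dict.mk (pre ++ (k, f v) :: post) := by
  have hfind : pre.find? (fun p => p.1 == k) = none := by
    apply List.find?_eq_none.mpr
    intro p hp
    simpa using hpre p.1 (List.mem_map_of_mem hp)
  have hcont : ((pre ++ (k, v) :: post).any fun p => p.1 == k) = true := by
    simp [List.any_append]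
  have hget : (PySem.Dict.mk (pre ++ (k, v) :: post)).getD k 0 = v := by
    simp [PySem.Dict.getD, PySem.Dict.get?, List.find?_append, hfind]
  unfold PySem.Dict.modify
  rw [hget]
  simp only [PySem.Dict.insert, PySem.Dict.contains, hcont, if_true]
  rw [List.map_append, List.map_cons, map_keep k _ pre hpre, map_keep k _ post hpost,
    if_pos (by simp)]

lemma fold_modify_mid (kws : List String) (p : String → Bool) (pre post : List (String × Int))
    (k : String) (v : Int)
    (hpre : ∀ s ∈ pre.map Prod.fst, (s == k) = false)
    (hpost : ∀ s ∈ post.map Prod.fst, (s == k) = false) :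
    List.foldl (fun d kw => if p kw = true then d.modify k 0 (fun x => x + 1) else d)
        (PySem.Dict.mk (pre ++ (k, v) :: post)) kws
      = PySem.Dict.mk (pre ++ (k, v + (kws.countP p : Int)) :: post) := by
  induction kws generalizing v with
  | nil => simp
  | cons kw kws ih =>
      by_cases h : p kw = true
      · rw [List.foldl_cons, if_pos h, modify_mid pre post k v _ hpre hpost, ih (v + 1)]
        have : v + 1 + (kws.countP p : Int) = v + ((kw :: kws).countP p : Int) := by
          simp [h]; ring
        rw [this]
      · rw [List.foldl_cons, if_neg h, ih v]
        have : v + (kws.countP p : Int) = v + ((kw :: kws).countP p : Int) := by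
          simp [h]
        rw [this]

lemma domains_fold (p : String → Bool) :
    ∀ (ds : List (String × List String)) (done : List (String × Int)) (g : String × List String → Int),
    (done.map Prod.fst ++ ds.map Prod.fst).Nodup →
    List.foldl (fun dc2 dk =>
        List.foldl (fun dc3 keyword =>
          if p keyword = true then dc3.modify dk.1 0 (fun x => x + 1) else dc3) dc2 dk.2)
      (PySem.Dict.mk (done ++ ds.map (fun dk => (dk.1, g dk)))) ds
    = PySem.Dict.mk (done ++ ds.map (fun dk => (dk.1, g dk + (dk.2.countP p : Int)))) := by
  intro ds
  induction ds with
  | nil => intro done g _; simp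
  | cons dk ds ih =>
      intro done g hnd
      have hnd' := List.nodup_append.mp hnd
      have hpre : ∀ s ∈ done.map Prod.fst, (s == dk.1) = false := by
        intro s hs
        have hne : s ≠ dk.1 := hnd'.2.2 s hs dk.1 (by simp)
        simpa using hne
      have hpost : ∀ s ∈ (ds.map (fun dk => (dk.1, g dk))).map Prod.fst, (s == dk.1) = false := by
        intro s hs
        have hne : dk.1 ∉ ds.map Prod.fst := (List.nodup_cons.mp (by simpa using hnd'.2.1)).1
        have hsm : s ∈ ds.map Prod.fst := by simpa using hs
        have : s ≠ dk.1 := fun hEq => hne (hEq ▸ hsm)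
        simpa using this
      rw [List.map_cons, List.foldl_cons,
        fold_modify_mid dk.2 p done (ds.map (fun dk => (dk.1, g dk))) dk.1 (g dk) hpre hpost]
      have e1 : done ++ (dk.1, g dk + (dk.2.countP p : Int)) :: ds.map (fun dk => (dk.1, g dk))
          = (done ++ [(dk.1, g dk + (dk.2.countP p : Int))]) ++ ds.map (fun dk => (dk.1, g dk)) := by
        simp
      rw [e1, ih (done ++ [(dk.1, g dk + (dk.2.countP p : Int))]) g (by simpa using hnd)]
      simp

lemma auditKeys_nodup :
    ((([] : List (String × Int)).map Prod.fst) ++ auditDomains.map Prod.fst).Nodup := by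
  simp [auditDomains]

set_option maxHeartbeats 1000000 in
lemma loopQ :
    ∀ (qs : List String) (g : String × List String → Int),
    List.foldl (fun dcq question =>
        List.foldl (fun dc2 dk =>
            List.foldl (fun dc3 keyword =>
                if PySem.Str.isIn (PySem.Str.lower keyword) (PySem.Str.lower question) = true then
                  dc3.modify dk.1 0 (fun x => x + 1)
                else dc3) dc2 dk.2) dcq auditDomains)
      (PySem.Dict.mk (auditDomains.map (fun dk => (dk.1, g dk)))) qs
    = PySem.Dict.mk (auditDomains.map (fun dk => (dk.1, g dk + cnt dk.2 qs))) := by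
  intro qs
  induction qs with
  | nil =>
      intro g
      rw [List.foldl_nil]
      exact congrArg PySem.Dict.mk (List.map_congr_left (fun dk _ => by rw [cnt_nil, add_zero]))
  | cons q qs ih =>
      intro g
      rw [List.foldl_cons]
      have h1 : List.foldl (fun dc2 dk =>
          List.foldl (fun dc3 keyword =>
              if PySem.Str.isIn (PySem.Str.lower keyword) (PySem.Str.lower q) = true then
                dc3.modify dk.1 0 (fun x => x + 1)
              else dc3) dc2 dk.2)
          (PySem.Dict.mk (auditDomains.map (fun dk => (dk.1, g dk)))) auditDomains
          = PySem.Dict.mk (auditDomains.map (fun dk => (dk.1, g dk + cQ dk.2 q))) := by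
        have h2 := domains_fold (fun kw => PySem.Str.isIn (PySem.Str.lower kw) (PySem.Str.lower q))
          auditDomains [] g auditKeys_nodup
        simp only [List.nil_append] at h2
        exact h2
      rw [h1, ih (fun dk => g dk + cQ dk.2 q)]
      exact congrArg PySem.Dict.mk (List.map_congr_left (fun dk _ => by
        rw [cnt_cons, add_assoc]))

lemma pyGetD_zero (a : String × Int) (t : List (String × Int)) (d : String × Int) :
    PySem.List.pyGetD (a :: t) 0 d = a := by
  simp [PySem.List.pyGetD, PySem.List.pyGet?, PySem.List.pyIdx?]

lemma pyGetD_one (a b : String × Int) (t : List (String × Int)) (d : String × Int) :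
    PySem.List.pyGetD (a :: b :: t) 1 d = b := by
  simp [PySem.List.pyGetD, PySem.List.pyGet?, PySem.List.pyIdx?]

lemma pyGetD_two (a b c : String × Int) (t : List (String × Int)) (d : String × Int) :
    PySem.List.pyGetD (a :: b :: c :: t) 2 d = c := by
  simp [PySem.List.pyGetD, PySem.List.pyGet?, PySem.List.pyIdx?,
    show (2 : Int) ≤ (t.length : Int) + 1 + 1 by omega]

lemma insertBy_cons (bf : (String × Int) → (String × Int) → Bool) (x y : String × Int)
    (ys : List (String × Int)) :
    PySem.List.insertBy bf x (y :: ys) =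
      if bf x y then x :: y :: ys else y :: PySem.List.insertBy bf x ys := by
  simp [PySem.List.insertBy]

lemma foldl_ins_head (xs : List (String × Int)) :
    ∀ (h : String × Int) (t : List (String × Int)),
    ∃ t', List.foldl (fun acc x => PySem.List.insertBy (fun a b => decide (b.2 < a.2)) x acc)
        (h :: t) xs = (List.foldl bstep h xs) :: t' := by
  induction xs with
  | nil => intro h t; exact ⟨t, rfl⟩
  | cons x xs ih =>
      intro h t
      rw [List.foldl_cons, insertBy_cons, List.foldl_cons]
      by_cases hc : h.2 < x.2
      · rw [if_pos (by simpa using hc), show bstep h x = x from by simp [bstep, hc]]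
        exact ih x (h :: t)
      · rw [if_neg (by simpa using hc), show bstep h x = h from by simp [bstep, hc]]
        exact ih h _

lemma sorted_head (x : String × Int) (r : List (String × Int)) :
    ∃ t', PySem.List.sorted (x :: r) (fun p : String × Int => p.2) true
        = (List.foldl bstep x r) :: t' := by
  rw [PySem.List.sorted_rev_eq_foldl_insertBy, List.foldl_cons]
  exact foldl_ins_head r x []

lemma bfold_init (l : List (String × Int)) :
    ∀ (b b' : String × Int), b.2 = b'.2 →
      List.foldl bstep b l = List.foldl bstep b' l ∨
        (List.foldl bstep b l = b ∧ List.foldl bstep b' l = b') := by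
  induction l with
  | nil => intro b b' _; exact Or.inr ⟨rfl, rfl⟩
  | cons p l ih =>
      intro b b' he
      rw [List.foldl_cons, List.foldl_cons]
      by_cases hc : b.2 < p.2
      · rw [show bstep b p = p from by simp [bstep, hc],
          show bstep b' p = p from by simp [bstep, he ▸ hc]]
        exact Or.inl rfl
      · rw [show bstep b p = b from by simp [bstep, hc],
          show bstep b' p = b' from by simp [bstep, he ▸ hc]]
        exact ih b b' he

lemma bstep_full_eq (st : Int × (String × Int)) (p : String × Int) :
    (if (if 0 < p.2 then (st.1 + 1, st.2) else st).2.2 < p.2 then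
      ((if 0 < p.2 then (st.1 + 1, st.2) else st).1, p.1, p.2)
    else if 0 < p.2 then (st.1 + 1, st.2) else st)
    = ((if 0 < p.2 then st.1 + 1 else st.1), bstep st.2 p) := by
  by_cases h1 : 0 < p.2 <;> by_cases h2 : st.2.2 < p.2 <;> simp [bstep, h1, h2]

lemma bsplit :
    ∀ (l : List (String × Int)) (n : Int) (b : String × Int),
    List.foldl (fun st p =>
      if (if 0 < p.2 then (st.1 + 1, st.2) else st).2.2 < p.2 then
        ((if 0 < p.2 then (st.1 + 1, st.2) else st).1, p.1, p.2)
      else if 0 < p.2 then (st.1 + 1, st.2) else st) (n, b) l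
      = (n + (l.countP (fun p => decide (0 < p.2)) : Int), List.foldl bstep b l) := by
  intro l
  induction l with
  | nil => intro n b; simp
  | cons p l ih =>
      intro n b
      rw [List.foldl_cons, bstep_full_eq (n, b) p, ih]
      by_cases h1 : 0 < p.2 <;> simp [h1, List.foldl_cons] <;> omega

lemma bsplit_fst (l : List (String × Int)) :
    (List.foldl (fun st p =>
      if (if 0 < p.2 then (st.1 + 1, st.2) else st).2.2 < p.2 then
        ((if 0 < p.2 then (st.1 + 1, st.2) else st).1, p.1, p.2)
      else if 0 < p.2 then (st.1 + 1, st.2) else st) ((0 : Int), ("", (0 : Int))) l).1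
      = (l.countP (fun p => decide (0 < p.2)) : Int) := by
  rw [bsplit]; simp

lemma bsplit_snd2 (l : List (String × Int)) :
    (List.foldl (fun st p =>
      if (if 0 < p.2 then (st.1 + 1, st.2) else st).2.2 < p.2 then
        ((if 0 < p.2 then (st.1 + 1, st.2) else st).1, p.1, p.2)
      else if 0 < p.2 then (st.1 + 1, st.2) else st) ((0 : Int), ("", (0 : Int))) l).2.2
      = (List.foldl bstep ("", (0 : Int)) l).2 := by
  rw [bsplit]

lemma bsplit_snd1 (l : List (String × Int)) :
    (List.foldl (fun st p =>
      if (if 0 < p.2 then (st.1 + 1, st.2) else st).2.2 < p.2 then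
        ((if 0 < p.2 then (st.1 + 1, st.2) else st).1, p.1, p.2)
      else if 0 < p.2 then (st.1 + 1, st.2) else st) ((0 : Int), ("", (0 : Int))) l).2.1
      = (List.foldl bstep ("", (0 : Int)) l).1 := by
  rw [bsplit]

lemma dec_eq (l : List (String × Int)) (hlen : 4 ≤ l.length) (hpos : ∀ p ∈ l, 0 ≤ p.2) :
    (if 3 < PySem.List.len (PySem.List.sorted l (fun x => x.2) true) ∧
        0 < (PySem.List.pyGetD (PySem.List.sorted l (fun x => x.2) true) 0 ("", 0)).2 ∧
        0 < (PySem.List.pyGetD (PySem.List.sorted l (fun x => x.2) true) 1 ("", 0)).2 ∧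
        0 < (PySem.List.pyGetD (PySem.List.sorted l (fun x => x.2) true) 2 ("", 0)).2 then
      "Audit de sécurité complet"
    else if 0 < (PySem.List.pyGetD (PySem.List.sorted l (fun x => x.2) true) 0 ("", 0)).2 then
      "Audit spécifique: " ++ (PySem.List.pyGetD (PySem.List.sorted l (fun x => x.2) true) 0 ("", 0)).1
    else "Audit de sécurité général")
    =
    (if 3 ≤ (List.foldl (fun st p =>
      if (if 0 < p.2 then (st.1 + 1, st.2) else st).2.2 < p.2 then
        ((if 0 < p.2 then (st.1 + 1, st.2) else st).1, p.1, p.2)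
      else if 0 < p.2 then (st.1 + 1, st.2) else st) ((0 : Int), ("", (0 : Int))) l).1 then "Audit de sécurité complet"
     else if 0 < (List.foldl (fun st p =>
      if (if 0 < p.2 then (st.1 + 1, st.2) else st).2.2 < p.2 then
        ((if 0 < p.2 then (st.1 + 1, st.2) else st).1, p.1, p.2)
      else if 0 < p.2 then (st.1 + 1, st.2) else st) ((0 : Int), ("", (0 : Int))) l).2.2 then
       "Audit spécifique: " ++ (List.foldl (fun st p =>
      if (if 0 < p.2 then (st.1 + 1, st.2) else st).2.2 < p.2 then
        ((if 0 < p.2 then (st.1 + 1, st.2) else st).1, p.1, p.2)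
      else if 0 < p.2 then (st.1 + 1, st.2) else st) ((0 : Int), ("", (0 : Int))) l).2.1
     else "Audit de sécurité général") := by
  rcases l with _ | ⟨x, r⟩
  · simp at hlen
  · obtain ⟨t', hs⟩ := sorted_head x r
    have hlen2 := PySem.List.length_sorted (x :: r) (fun p : String × Int => p.2) true
    rcases t' with _ | ⟨bb, t2⟩
    · rw [hs] at hlen2
      simp only [List.length_cons, List.length_nil] at hlen2 hlen
      omega
    rcases t2 with _ | ⟨cc, rest⟩
    · rw [hs] at hlen2
      simp only [List.length_cons, List.length_nil] at hlen2 hlen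
      omega
    set a := List.foldl bstep x r with ha
    rw [hs] at hlen2
    rw [hs, pyGetD_zero, pyGetD_one, pyGetD_two, PySem.List.len_eq,
      bsplit_fst, bsplit_snd2, bsplit_snd1]
    have hperm := PySem.List.sorted_perm (x :: r) (fun p : String × Int => p.2) true
    rw [hs] at hperm
    have hpw := PySem.List.sorted_pairwise_rev (x :: r) (fun p : String × Int => p.2)
    rw [hs] at hpw
    obtain ⟨hp1, hpw1⟩ := List.pairwise_cons.mp hpw
    obtain ⟨hp2, hpw2⟩ := List.pairwise_cons.mp hpw1
    obtain ⟨hp3, -⟩ := List.pairwise_cons.mp hpw2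
    have hab : bb.2 ≤ a.2 := hp1 bb (by simp)
    have hbc : cc.2 ≤ bb.2 := hp2 cc (by simp)
    have h3len : (3 : Int) < ((a :: bb :: cc :: rest).length : Int) := by
      rw [hlen2]
      have h4 : 4 ≤ (x :: r).length := hlen
      omega
    have hbest : (List.foldl bstep ("", (0 : Int)) (x :: r)).2 = a.2 ∧
        (0 < a.2 → List.foldl bstep ("", (0 : Int)) (x :: r) = a) := by
      rw [List.foldl_cons]
      by_cases hx : (0 : Int) < x.2
      · rw [show bstep ("", (0 : Int)) x = x from by simp [bstep, hx]]
        exact ⟨rfl, fun _ => rfl⟩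
      · have hx0 : x.2 = 0 := by
          have := hpos x (by simp)
          omega
        rw [show bstep ("", (0 : Int)) x = ("", (0 : Int)) from by simp [bstep, hx0]]
        rcases bfold_init r ("", (0 : Int)) x (by simp [hx0]) with he | ⟨hb1, hb2⟩
        · rw [he]; exact ⟨rfl, fun _ => rfl⟩
        · rw [hb1]
          have ha2 : a.2 = 0 := by rw [ha, hb2, hx0]
          exact ⟨by simp [ha2], fun h0 => absurd h0 (by omega)⟩
    obtain ⟨hbest2, hbesteq⟩ := hbest
    have hcnt : (x :: r).countP (fun p => decide (0 < p.2))
        = (a :: bb :: cc :: rest).countP (fun p => decide (0 < p.2)) := (hperm.countP_eq _).symm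
    have E1 : (0 < a.2 ∧ 0 < bb.2 ∧ 0 < cc.2) ↔
        3 ≤ (((x :: r).countP (fun p => decide (0 < p.2)) : Nat) : Int) := by
      rw [hcnt]
      constructor
      · rintro ⟨hA, hB, hC⟩
        simp [hA, hB, hC]
        omega
      · intro h
        by_cases hC : 0 < cc.2
        · exact ⟨by omega, by omega, hC⟩
        · exfalso
          have hr0 : rest.countP (fun p => decide (0 < p.2)) = 0 :=
            List.countP_eq_zero.mpr (fun p hp => by
              have := hp3 p hp
              simp
              omega)
          simp [List.countP_cons, hr0, hC] at h
          omega
    by_cases hc1 : 0 < a.2 ∧ 0 < bb.2 ∧ 0 < cc.2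
    · rw [if_pos ⟨h3len, hc1.1, hc1.2.1, hc1.2.2⟩, if_pos (E1.mp hc1)]
    · rw [if_neg (fun hh => hc1 ⟨hh.2.1, hh.2.2.1, hh.2.2.2⟩),
        if_neg (fun hh => hc1 (E1.mpr hh))]
      rw [hbest2]
      by_cases hc2 : 0 < a.2
      · rw [if_pos hc2, if_pos hc2, hbesteq hc2]
      · rw [if_neg hc2, if_neg hc2]

set_option maxHeartbeats 1000000 in
lemma port_dict_eq (responses : List (String × String)) :
    List.foldl (fun dcq question =>
        List.foldl (fun dc2 dk =>
            List.foldl (fun dc3 keyword =>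
                if PySem.Str.isIn (PySem.Str.lower keyword) (PySem.Str.lower question) = true then
                  dc3.modify dk.1 0 (fun x => x + 1)
                else dc3) dc2 dk.2) dcq auditDomains)
      (List.foldl (fun d p => d.insert p.1 0) PySem.Dict.empty auditDomains)
      ((PySem.Dict.ofList responses).keys)
      = PySem.Dict.mk (auditDomains.map (fun dk =>
          (dk.1, cnt dk.2 ((PySem.Dict.ofList responses).keys)))) := by
  have hinit : (List.foldl (fun d p => d.insert p.1 0) PySem.Dict.empty auditDomains)
      = PySem.Dict.mk (auditDomains.map (fun dk => (dk.1, (0 : Int)))) := by decide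
  rw [hinit]
  have h := loopQ ((PySem.Dict.ofList responses).keys) (fun _ => (0 : Int))
  simp only [zero_add] at h
  exact h

-- ===== VERDICT (by name: the statement is the Claim_ definition above) =====
set_option maxHeartbeats 1000000 in
theorem detect_audit_type_py_spec : Claim_equal_detect_audit_type_py := by
  intro responses _
  unfold Spec_detect_audit_type_py
  simp only [detect_audit_type_py, detect_audit_type_py_alt]
  rw [port_dict_eq responses]
  exact dec_eq _
    (by simp [auditDomains])
    (by
      intro p hp
      simp only [List.mem_map] at hp
      obtain ⟨dk, -, rfl⟩ := hp
      exact cnt_nonneg _ _)
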